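-- pv_equiv track=rewrite | github.com/rienajoy/CaseManagementSystem | backend/app/services/nlp/document_zones.py | split_document_zones
-- ===== SOURCE A (Python) =====
-- def split_document_zones(text: str) -> dict:
--     if not text:
--         return {
--             "full_text": "",
--             "header_text": "",
--             "caption_text": "",
--             "body_text": "",
--             "signature_text": "",
--             "tail_text": "",
--         }
--
--     lines = [line.rstrip() for line in text.splitlines()]
--     non_empty = [line.strip() for line in lines if line.strip()]
--
--     header_lines = non_empty[:25]
--     header_text = "\n".join(header_lines)
--
--     upper = text.upper()
--
--     signature_markers = [
--         "IN WITNESS WHEREOF",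
--         "SUBSCRIBED AND SWORN",
--         "SO ORDERED",
--         "WHEREFORE",
--         "RESPECTFULLY SUBMITTED",
--         "DONE IN CHAMBERS",
--     ]
--
--     sig_idx = len(text)
--     for marker in signature_markers:
--         idx = upper.find(marker)
--         if idx != -1:
--             sig_idx = min(sig_idx, idx)
--
--     if sig_idx < len(text):
--         body_text = text[:sig_idx].strip()
--         signature_text = text[sig_idx:].strip()
--     else:
--         body_text = text
--         signature_text = ""
--
--     caption_text = "\n".join(non_empty[:18])
--
--     tail_text = "\n".join(non_empty[-20:])
--
--     return {
--         "full_text": text,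
--         "header_text": header_text,
--         "caption_text": caption_text,
--         "body_text": body_text,
--         "signature_text": signature_text,
--         "tail_text": tail_text,
--     }
-- ===== SOURCE B (Python) =====
-- _MARKERS = (
--     "IN WITNESS WHEREOF",
--     "SUBSCRIBED AND SWORN",
--     "SO ORDERED",
--     "WHEREFORE",
--     "RESPECTFULLY SUBMITTED",
--     "DONE IN CHAMBERS",
-- )
--
--
-- def split_document_zones(text: str) -> dict:
--     non_empty = [s for s in map(str.strip, text.splitlines()) if s]
--     upper = text.upper()
--     sig_idx = next((i for i in range(len(text))
--                     if any(upper.startswith(m, i) for m in _MARKERS)), len(text))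
--     if sig_idx < len(text):
--         body_text, signature_text = text[:sig_idx].strip(), text[sig_idx:].strip()
--     else:
--         body_text, signature_text = text, ""
--     return {
--         "full_text": text,
--         "header_text": "\n".join(non_empty[:25]),
--         "caption_text": "\n".join(non_empty[:18]),
--         "body_text": body_text,
--         "signature_text": signature_text,
--         "tail_text": "\n".join(non_empty[-20:]),
--     }
-- ===== Notes on version B (the rewrite author's own statement) =====
-- stated objective: alternative
-- what changed: B drops A's redundant empty-text early return, builds non_empty with one map-then-filter pass instead of rstrip-then-filter-then-strip, and replaces A's six separate upper.find scans combined by min with a single left-to-right scan that stops at the first position where any marker starts.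
import Mathlib
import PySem

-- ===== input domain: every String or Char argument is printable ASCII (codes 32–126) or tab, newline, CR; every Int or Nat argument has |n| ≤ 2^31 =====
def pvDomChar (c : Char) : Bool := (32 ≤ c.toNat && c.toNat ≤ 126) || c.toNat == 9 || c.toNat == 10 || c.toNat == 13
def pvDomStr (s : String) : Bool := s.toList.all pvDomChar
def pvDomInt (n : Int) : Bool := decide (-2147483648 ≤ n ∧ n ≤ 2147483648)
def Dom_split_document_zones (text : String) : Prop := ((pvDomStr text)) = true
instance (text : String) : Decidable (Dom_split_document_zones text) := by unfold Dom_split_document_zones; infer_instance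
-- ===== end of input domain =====

-- B replaces the six find-and-min marker scans with one leftmost scan, fuses the
-- line cleanup into a single map-then-filter pass, and drops the redundant
-- empty-text early return (alternative decomposition, same exact behaviour).

-- ===== PORT A =====
def split_document_zones (text : String) : List (String × String) :=
  if text = "" then
    [("full_text", ""), ("header_text", ""), ("caption_text", ""),
     ("body_text", ""), ("signature_text", ""), ("tail_text", "")]
  else
    let lines := (PySem.Str.splitlines text).map (fun l => PySem.Str.rstrip l)
    let non_empty := (lines.filter (fun l => PySem.Str.strip l != "")).map (fun l => PySem.Str.strip l)
    let header_text := PySem.Str.join "\n" (PySem.List.slice non_empty none (some 25))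
    let upper := PySem.Str.upper text
    let markers : List String :=
      ["IN WITNESS WHEREOF", "SUBSCRIBED AND SWORN", "SO ORDERED",
       "WHEREFORE", "RESPECTFULLY SUBMITTED", "DONE IN CHAMBERS"]
    let sig_idx : Int := markers.foldl (fun acc m =>
      let idx := PySem.Str.find upper m
      if idx ≠ -1 then min acc idx else acc) (PySem.Str.len text)
    let bs :=
      if sig_idx < PySem.Str.len text then
        (PySem.Str.strip (PySem.Str.slice text none (some sig_idx)),
         PySem.Str.strip (PySem.Str.slice text (some sig_idx) none))
      else (text, "")
    let caption_text := PySem.Str.join "\n" (PySem.List.slice non_empty none (some 18))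
    let tail_text := PySem.Str.join "\n" (PySem.List.slice non_empty (some (-20)) none)
    [("full_text", text), ("header_text", header_text), ("caption_text", caption_text),
     ("body_text", bs.1), ("signature_text", bs.2), ("tail_text", tail_text)]

-- ===== PORT B =====
def sdzMarkers : List String :=
  ["IN WITNESS WHEREOF", "SUBSCRIBED AND SWORN", "SO ORDERED",
   "WHEREFORE", "RESPECTFULLY SUBMITTED", "DONE IN CHAMBERS"]

def split_document_zones_alt (text : String) : List (String × String) :=
  let non_empty := ((PySem.Str.splitlines text).map PySem.Str.strip).filter (fun s => s != "")
  let upper := PySem.Str.upper text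
  let n := text.toList.length    -- len(text)
  -- upper.startswith(m, i) with 0 ≤ i ≤ len(upper) is exactly the prefix test on the drop at i
  let sig_idx : Nat :=
    ((List.range n).find? (fun i =>
      sdzMarkers.any (fun m => PySem.Chars.startswith (upper.toList.drop i) m.toList))).getD n
  let bs :=
    if sig_idx < n then
      (PySem.Str.strip (PySem.Str.slice text none (some (sig_idx : Int))),
       PySem.Str.strip (PySem.Str.slice text (some (sig_idx : Int)) none))
    else (text, "")
  [("full_text", text),
   ("header_text", PySem.Str.join "\n" (PySem.List.slice non_empty none (some 25))),
   ("caption_text", PySem.Str.join "\n" (PySem.List.slice non_empty none (some 18))),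
   ("body_text", bs.1), ("signature_text", bs.2),
   ("tail_text", PySem.Str.join "\n" (PySem.List.slice non_empty (some (-20)) none))]

-- ===== PRECONDITION & SPEC =====
def Spec_split_document_zones (text : String) (out : List (String × String)) : Prop := out = split_document_zones_alt text
instance (text : String) (out : List (String × String)) : Decidable (Spec_split_document_zones text out) := by unfold Spec_split_document_zones; infer_instance

-- ===== CLAIM (what is proved, stated in full; the proofs are below) =====
def Claim_equal_split_document_zones : Prop := ∀ (text : String), Dom_split_document_zones text → Spec_split_document_zones text (split_document_zones text)

-- ===== LEMMAS AND PROOFS =====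

-- rstrip of a cons, by cases on whether the tail strips to nothing
theorem sdz_rstrip_cons (p : Char → Bool) (a : Char) (t : List Char) :
    (List.dropWhile p ((a :: t).reverse)).reverse =
      if (List.dropWhile p t.reverse).reverse = [] then (if p a then [] else [a])
      else a :: (List.dropWhile p t.reverse).reverse := by
  simp only [List.reverse_cons, List.dropWhile_append, List.reverse_eq_nil_iff, List.isEmpty_iff]
  split_ifs with h1 h2 <;> simp_all [List.dropWhile]

-- lstrip and rstrip commute
theorem sdz_lstrip_rstrip (l : List Char) :
    PySem.Chars.lstrip (PySem.Chars.rstrip l) = PySem.Chars.rstrip (PySem.Chars.lstrip l) := by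
  unfold PySem.Chars.lstrip PySem.Chars.rstrip
  induction l with
  | nil => simp
  | cons a t ih =>
    have hr := sdz_rstrip_cons PySem.Chars.isspace a t
    simp only [List.reverse_cons] at hr
    rw [List.reverse_cons, hr]
    by_cases hp : PySem.Chars.isspace a
    · by_cases hz : (List.dropWhile PySem.Chars.isspace t.reverse).reverse = []
      · simp [hz, hp, ih.symm]
      · simp [hz, hp, ih]
    · by_cases hz : (List.dropWhile PySem.Chars.isspace t.reverse).reverse = []
      · simp [hz, hp, hr]
      · simp [hz, hp, hr]

-- strip ∘ rstrip = strip (Python: line.rstrip().strip() == line.strip())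
theorem sdz_strip_rstrip (l : List Char) :
    PySem.Chars.strip (PySem.Chars.rstrip l) = PySem.Chars.strip l := by
  have idem : ∀ x : List Char, PySem.Chars.rstrip (PySem.Chars.rstrip x) = PySem.Chars.rstrip x := by
    intro x
    unfold PySem.Chars.rstrip
    rw [List.reverse_reverse, List.dropWhile_idempotent]
  rw [PySem.Chars.strip, sdz_lstrip_rstrip, PySem.Chars.strip]
  exact idem _

theorem sdz_str_strip_rstrip (s : String) :
    PySem.Str.strip (PySem.Str.rstrip s) = PySem.Str.strip s := by
  have h := PySem.Str.toList_strip (PySem.Str.rstrip s)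
  rw [PySem.Str.toList_rstrip, sdz_strip_rstrip] at h
  rw [← PySem.Str.toList_strip] at h
  exact String.toList_inj.mp h

-- A's rstrip-filter-strip pipeline equals B's strip-filter pipeline
theorem sdz_non_empty_eq (text : String) :
    (((PySem.Str.splitlines text).map (fun l => PySem.Str.rstrip l)).filter
        (fun l => PySem.Str.strip l != "")).map (fun l => PySem.Str.strip l) =
      ((PySem.Str.splitlines text).map PySem.Str.strip).filter (fun s => s != "") := by
  rw [List.filter_map, List.filter_map]
  have hf : ((fun l => PySem.Str.strip l) ∘ fun l => PySem.Str.rstrip l) = PySem.Str.strip := by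
    funext x; exact sdz_str_strip_rstrip x
  have hp : ((fun l => PySem.Str.strip l != "") ∘ fun l => PySem.Str.rstrip l)
      = ((fun s => s != "") ∘ PySem.Str.strip) := by
    funext x; simp [Function.comp, sdz_str_strip_rstrip]
  rw [List.map_map, hf, hp]

-- foldl min facts
theorem sdz_foldl_min_le_init (l : List Int) (acc : Int) : l.foldl min acc ≤ acc := by
  induction l generalizing acc with
  | nil => simp
  | cons a t ih => exact le_trans (ih _) (min_le_left _ _)

theorem sdz_foldl_min_le_mem {l : List Int} {x : Int} (h : x ∈ l) (acc : Int) :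
    l.foldl min acc ≤ x := by
  induction l generalizing acc with
  | nil => simp at h
  | cons a t ih =>
    rcases List.mem_cons.1 h with rfl | h'
    · simpa using le_trans (sdz_foldl_min_le_init t (min acc x)) (min_le_right acc x)
    · exact ih h' _

theorem sdz_foldl_min_mem (l : List Int) (acc : Int) :
    l.foldl min acc = acc ∨ l.foldl min acc ∈ l := by
  induction l generalizing acc with
  | nil => simp
  | cons a t ih =>
    simp only [List.foldl_cons]
    rcases ih (min acc a) with h | h
    · rcases min_cases acc a with ⟨he, _⟩ | ⟨he, _⟩
      · exact Or.inl (by rw [h, he])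
      · exact Or.inr (by rw [h, he]; exact List.mem_cons_self ..)
    · exact Or.inr (List.mem_cons.2 (Or.inr h))

-- A's marker fold is a foldl min over the successful finds
theorem sdz_fold_eq_foldl_min (u : List Char) (ms : List (List Char)) (acc : Int) :
    ms.foldl (fun acc m =>
        let idx := PySem.Chars.find u m
        if idx ≠ -1 then min acc idx else acc) acc =
      (ms.filterMap (fun m =>
        if PySem.Chars.find u m = -1 then none else some (PySem.Chars.find u m))).foldl min acc := by
  induction ms generalizing acc with
  | nil => rfl
  | cons m t ih =>
    rw [List.foldl_cons, List.filterMap_cons]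
    by_cases h : PySem.Chars.find u m = -1
    · rw [if_pos h]
      have hs : (let idx := PySem.Chars.find u m
          if idx ≠ -1 then min acc idx else acc) = acc := by simp [h]
      rw [hs]
      exact ih acc
    · rw [if_neg h]
      have hs : (let idx := PySem.Chars.find u m
          if idx ≠ -1 then min acc idx else acc) = min acc (PySem.Chars.find u m) := by simp [h]
      rw [hs, List.foldl_cons]
      exact ih _

-- the central lemma: A's min-of-finds equals B's leftmost scan
theorem sdz_sig_idx_eq (u : List Char) (ms : List (List Char)) (n : Nat)
    (hlen : u.length = n) (hne : ∀ m ∈ ms, m ≠ []) :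
    ms.foldl (fun acc m =>
        let idx := PySem.Chars.find u m
        if idx ≠ -1 then min acc idx else acc) (n : Int) =
      ((((List.range n).find? (fun i =>
          ms.any (fun m => PySem.Chars.startswith (u.drop i) m))).getD n : Nat) : Int) := by
  set p : Nat → Bool := fun i => ms.any (fun m => PySem.Chars.startswith (u.drop i) m) with hpdef
  have hp : ∀ i, p i = true ↔ ∃ m ∈ ms, m <+: u.drop i := by
    intro i
    simp [hpdef, List.any_eq_true, PySem.Chars.startswith_iff]
  have hfound : ∀ m ∈ ms, PySem.Chars.find u m ≠ -1 →
      0 ≤ PySem.Chars.find u m ∧ m <+: u.drop (PySem.Chars.find u m).toNat ∧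
      (PySem.Chars.find u m).toNat < n ∧
      (∀ j < (PySem.Chars.find u m).toNat, ¬ m <+: u.drop j) := by
    intro m hm h
    have h0 : 0 ≤ PySem.Chars.find u m := by
      have := PySem.Chars.neg_one_le_find u m
      omega
    obtain ⟨hpre, hmin⟩ := PySem.Chars.find_spec h0
    refine ⟨h0, hpre, ?_, hmin⟩
    have hnil : u.drop (PySem.Chars.find u m).toNat ≠ [] := by
      intro hd
      rw [hd] at hpre
      exact hne m hm (List.prefix_nil.mp hpre)
    rw [← hlen]
    by_contra hle
    exact hnil (List.drop_eq_nil_of_le (by omega))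
  have hfindle : ∀ m ∈ ms, ∀ i : Nat, m <+: u.drop i →
      PySem.Chars.find u m ≠ -1 ∧ PySem.Chars.find u m ≤ (i : Int) := by
    intro m hm i hpre
    have hin : PySem.Chars.isIn m u = true :=
      (PySem.Chars.exists_prefix_drop_iff_isIn m u).mp ⟨i, hpre⟩
    have hne1 : PySem.Chars.find u m ≠ -1 :=
      (PySem.Chars.find_ne_neg_one_iff u m).mpr ((PySem.Chars.isIn_iff_infix m u).mp hin)
    obtain ⟨h0, _, _, hmin⟩ := hfound m hm hne1
    refine ⟨hne1, ?_⟩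
    by_contra hlt
    exact hmin i (by omega) hpre
  rw [sdz_fold_eq_foldl_min]
  set hits := ms.filterMap (fun m =>
    if PySem.Chars.find u m = -1 then none else some (PySem.Chars.find u m)) with hhits
  have hmem : ∀ x, x ∈ hits ↔ ∃ m ∈ ms, PySem.Chars.find u m ≠ -1 ∧ PySem.Chars.find u m = x := by
    intro x
    simp only [hhits, List.mem_filterMap]
    constructor
    · rintro ⟨m, hm, hx⟩
      by_cases h : PySem.Chars.find u m = -1
      · simp [h] at hx
      · simp [h] at hx; exact ⟨m, hm, h, hx⟩
    · rintro ⟨m, hm, h, hx⟩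
      refine ⟨m, hm, ?_⟩
      rw [if_neg h, hx]
  cases hcase : (List.range n).find? p with
  | none =>
    have hnone : ∀ j < n, p j = false := by
      intro j hj
      have := List.find?_eq_none.mp hcase j (List.mem_range.mpr hj)
      simpa using this
    have hempty : hits = [] := by
      rw [List.eq_nil_iff_forall_not_mem]
      intro x hx
      obtain ⟨m, hm, hne1, _⟩ := (hmem x).mp hx
      obtain ⟨_, hpre, hlt, _⟩ := hfound m hm hne1
      have : p (PySem.Chars.find u m).toNat = true := (hp _).mpr ⟨m, hm, hpre⟩
      rw [hnone _ hlt] at this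
      exact Bool.false_ne_true this
    simp [hempty]
  | some i =>
    obtain ⟨hpi, j, hjlt, hj, hfirst⟩ := List.find?_eq_some_iff_getElem.mp hcase
    rw [List.getElem_range] at hj
    subst hj
    have hin : j < n := by simpa using hjlt
    have hfirst' : ∀ k < j, p k = false := by
      intro k hkj
      have := hfirst k hkj
      simpa [List.getElem_range] using this
    obtain ⟨m0, hm0, hpre0⟩ := (hp j).mp hpi
    obtain ⟨hne0, hle0⟩ := hfindle m0 hm0 j hpre0
    have hm0hits : PySem.Chars.find u m0 ∈ hits := (hmem _).mpr ⟨m0, hm0, hne0, rfl⟩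
    have hub : hits.foldl min (n : Int) ≤ (j : Int) :=
      le_trans (sdz_foldl_min_le_mem hm0hits _) hle0
    have hlb : (j : Int) ≤ hits.foldl min (n : Int) := by
      rcases sdz_foldl_min_mem hits (n : Int) with h | h
      · rw [h]; omega
      · obtain ⟨m1, hm1, hne1, hx⟩ := (hmem _).mp h
        obtain ⟨h0, hpre1, hlt1, _⟩ := hfound m1 hm1 hne1
        have hpk : p (PySem.Chars.find u m1).toNat = true := (hp _).mpr ⟨m1, hm1, hpre1⟩
        have : ¬ (PySem.Chars.find u m1).toNat < j := by
          intro hc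
          rw [hfirst' _ hc] at hpk
          exact Bool.false_ne_true hpk
        rw [← hx]
        omega
    simp only [Option.getD_some]
    omega

-- ===== VERDICT (by name: the statement is the Claim_ definition above) =====
theorem split_document_zones_spec : Claim_equal_split_document_zones := by
  intro text _
  unfold Spec_split_document_zones
  by_cases h : text = ""
  · subst h; decide
  · simp only [split_document_zones, split_document_zones_alt, if_neg h]
    rw [sdz_non_empty_eq]
    have hsig :
        (["IN WITNESS WHEREOF", "SUBSCRIBED AND SWORN", "SO ORDERED",
          "WHEREFORE", "RESPECTFULLY SUBMITTED", "DONE IN CHAMBERS"] : List String).foldl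
            (fun acc m =>
              let idx := PySem.Str.find (PySem.Str.upper text) m
              if idx ≠ -1 then min acc idx else acc) (PySem.Str.len text) =
          ((((List.range text.toList.length).find? (fun i =>
            sdzMarkers.any (fun m =>
              PySem.Chars.startswith ((PySem.Str.upper text).toList.drop i) m.toList))).getD
                text.toList.length : Nat) : Int) := by
      have hlen : (PySem.Str.upper text).toList.length = text.toList.length := by
        rw [PySem.Str.toList_upper, PySem.Chars.upper, List.length_map]
      have key := sdz_sig_idx_eq (PySem.Str.upper text).toList
        (sdzMarkers.map String.toList) text.toList.length hlen
        (by decide)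
      rw [List.foldl_map] at key
      rw [PySem.Str.len_eq]
      have hany : ∀ i : Nat,
          ((sdzMarkers.map String.toList).any
            (fun m => PySem.Chars.startswith ((PySem.Str.upper text).toList.drop i) m)) =
          (sdzMarkers.any (fun m =>
            PySem.Chars.startswith ((PySem.Str.upper text).toList.drop i) m.toList)) := by
        intro i
        rw [List.any_map]
        rfl
      simp only [hany] at key
      exact key
    rw [hsig, PySem.Str.len_eq]
    simp only [Nat.cast_lt]
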